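-- pv_equiv track=rewrite | github.com/zzammz/MKcode | 2-Quizzes/CodeSignal/Python/alternatingSums.py | solution
-- ===== SOURCE A (Python) =====
-- def solution(a):
--     res = [0]*2
--     for i in range(len(a)):
--         if(i % 2 == 0):
--             res[0] += a[i]
--         else:
--             res[1] += a[i]
--     return res
-- ===== SOURCE B (Python) =====
-- def solution(a):
--     e = o = 0
--     for x in reversed(a):
--         e, o = x + o, e
--     return [e, o]
-- ===== Notes on version B (the rewrite author's own statement) =====
-- stated objective: alternative
-- what changed: Replaces the index loop with a parity branch by a single branch-free reversed pass that swaps the two accumulators at each element, so no index, no modulus and no subscripting is computed.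
import Mathlib
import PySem

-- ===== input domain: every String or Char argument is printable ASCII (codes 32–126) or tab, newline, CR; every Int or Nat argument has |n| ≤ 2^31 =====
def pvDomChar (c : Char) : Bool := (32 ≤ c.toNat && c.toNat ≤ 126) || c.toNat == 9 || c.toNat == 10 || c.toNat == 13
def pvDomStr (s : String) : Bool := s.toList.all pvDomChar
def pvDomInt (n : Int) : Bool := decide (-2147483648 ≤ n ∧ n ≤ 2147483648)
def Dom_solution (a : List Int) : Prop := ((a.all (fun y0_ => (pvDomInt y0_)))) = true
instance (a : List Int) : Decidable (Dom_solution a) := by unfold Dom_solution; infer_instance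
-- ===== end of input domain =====

-- B replaces A's index loop with a parity branch by one branch-free reversed pass
-- that swaps the two accumulators at each element (objective: alternative).

-- ===== PORT A =====
-- res is a two-element list mutated at fixed positions 0 and 1; it is carried as the pair
-- (res[0], res[1]) and rebuilt as the returned list.
def solution (a : List Int) : List Int :=
  let r := (PySem.List.pyRange 0 a.length 1).foldl
    (fun res i =>
      if PySem.Int.mod i 2 == 0 then (res.1 + PySem.List.pyGetD a i 0, res.2)
      else (res.1, res.2 + PySem.List.pyGetD a i 0))
    ((0 : Int), (0 : Int))
  [r.1, r.2]

-- ===== PORT B =====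
def solution_alt (a : List Int) : List Int :=
  let r := a.reverse.foldl (fun p x => (x + p.2, p.1)) ((0 : Int), (0 : Int))
  [r.1, r.2]

-- ===== PRECONDITION & SPEC =====
def Spec_solution (a : List Int) (out : List Int) : Prop := out = solution_alt a
instance (a : List Int) (out : List Int) : Decidable (Spec_solution a out) := by unfold Spec_solution; infer_instance

-- ===== CLAIM (what is proved, stated in full; the proofs are below) =====
def Claim_equal_solution : Prop := ∀ (a : List Int), Dom_solution a → Spec_solution a (solution a)

-- ===== LEMMAS AND PROOFS =====

-- B's accumulator as a foldr (reversed foldl = foldr with swapped step)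
def pvG (xs : List Int) : Int × Int := xs.foldr (fun x p => (x + p.2, p.1)) (0, 0)

theorem pvG_append (xs : List Int) (x : Int) :
    pvG (xs ++ [x]) =
      if xs.length % 2 = 0 then ((pvG xs).1 + x, (pvG xs).2)
      else ((pvG xs).1, (pvG xs).2 + x) := by
  induction xs with
  | nil => simp [pvG, add_comm]
  | cons y ys ih =>
    simp only [List.cons_append, pvG, List.foldr_cons, List.length_cons] at *
    rw [ih]
    by_cases h : ys.length % 2 = 0
    · rw [if_pos h, if_neg (by omega)]
    · rw [if_neg h, if_pos (by omega)]
      simp [add_assoc]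

-- A's loop accumulator
def pvF (a : List Int) : Int × Int :=
  (PySem.List.pyRange 0 a.length 1).foldl
    (fun res i =>
      if PySem.Int.mod i 2 == 0 then (res.1 + PySem.List.pyGetD a i 0, res.2)
      else (res.1, res.2 + PySem.List.pyGetD a i 0))
    ((0 : Int), (0 : Int))

theorem pvF_eq_pvG (a : List Int) : pvF a = pvG a := by
  induction a using List.reverseRecOn with
  | nil => simp [pvF, pvG, PySem.List.pyRange_one_eq_nil]
  | append_singleton xs x ih =>
    have hlen : ((xs ++ [x]).length : Int) = (xs.length : Int) + 1 := by
      simp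
    unfold pvF
    rw [hlen, PySem.List.pyRange_one_succ_right (by positivity), List.foldl_append]
    have hbody : (PySem.List.pyRange 0 (xs.length : Int) 1).foldl
        (fun res i =>
          if PySem.Int.mod i 2 == 0 then (res.1 + PySem.List.pyGetD (xs ++ [x]) i 0, res.2)
          else (res.1, res.2 + PySem.List.pyGetD (xs ++ [x]) i 0))
        ((0 : Int), (0 : Int)) = pvF xs := by
      unfold pvF
      apply PySem.List.foldl_congr_mem
      intro b i hi
      have hmem := (PySem.List.mem_pyRange_one).1 hi
      have h0 : 0 ≤ i := hmem.1
      have h1 : i < (xs.length : Int) := hmem.2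
      obtain ⟨n, rfl⟩ : ∃ n : Nat, i = (n : Int) := ⟨i.toNat, (Int.toNat_of_nonneg h0).symm⟩
      have hn : n < xs.length := by exact_mod_cast h1
      have hget : PySem.List.pyGetD (xs ++ [x]) (n : Int) 0 = PySem.List.pyGetD xs (n : Int) 0 := by
        rw [PySem.List.pyGetD_natCast, PySem.List.pyGetD_natCast,
            List.getD_eq_getElem _ _ (by simpa using Nat.lt_succ_of_lt hn),
            List.getD_eq_getElem _ _ hn]
        exact List.getElem_append_left (by omega)
      rw [hget]
    rw [hbody, ih]
    have hgetx : PySem.List.pyGetD (xs ++ [x]) (xs.length : Int) 0 = x := by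
      rw [PySem.List.pyGetD_natCast, List.getD_eq_getElem _ _ (by simp)]
      simp
    simp only [List.foldl_cons, List.foldl_nil]
    rw [hgetx, pvG_append]
    have hmod : (PySem.Int.mod (xs.length : Int) 2 == 0) = decide (xs.length % 2 = 0) := by
      have h : PySem.Int.mod (xs.length : Int) 2 = (xs.length : Int) % 2 := by
        simp [PySem.Int.mod, Int.fmod_eq_emod]
      rw [h]
      by_cases hn : xs.length % 2 = 0 <;> simp [hn] <;> omega
    rw [hmod]
    by_cases h : xs.length % 2 = 0 <;> simp [h]

-- ===== VERDICT (by name: the statement is the Claim_ definition above) =====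
theorem solution_spec : Claim_equal_solution := by
  intro a _
  unfold Spec_solution solution solution_alt
  rw [List.foldl_reverse]
  have := pvF_eq_pvG a
  unfold pvF pvG at this
  simp only []
  rw [this]
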